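-- pv_equiv track=rewrite | github.com/mike-saetern/Python- | algo_class/palindrome.py | visible_buildings
-- ===== SOURCE A (Python) =====
-- def visible_buildings(buildings):
--     visible = []
--     max_height = 0
--     for i in range(len(buildings)):
--         if buildings[i] > max_height: #checks value if it is bigger than max_height
--             visible.append(buildings[i])#appends into list
--             max_height = buildings[i]#max height becomes the value
--     return visible
-- ===== SOURCE B (Python) =====
-- def visible_buildings(buildings):
--     return [b for i, b in enumerate(buildings)
--             if b > 0 and all(b > x for x in buildings[:i])]
-- ===== Notes on version B (the rewrite author's own statement) =====
-- stated objective: alternative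
-- what changed: Drops the running max_height state entirely: B decides each building independently by re-scanning its whole prefix (b > 0 and b strictly above every earlier building), a stateless per-element brute-force filter instead of A's stateful single-pass loop.
import Mathlib
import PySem

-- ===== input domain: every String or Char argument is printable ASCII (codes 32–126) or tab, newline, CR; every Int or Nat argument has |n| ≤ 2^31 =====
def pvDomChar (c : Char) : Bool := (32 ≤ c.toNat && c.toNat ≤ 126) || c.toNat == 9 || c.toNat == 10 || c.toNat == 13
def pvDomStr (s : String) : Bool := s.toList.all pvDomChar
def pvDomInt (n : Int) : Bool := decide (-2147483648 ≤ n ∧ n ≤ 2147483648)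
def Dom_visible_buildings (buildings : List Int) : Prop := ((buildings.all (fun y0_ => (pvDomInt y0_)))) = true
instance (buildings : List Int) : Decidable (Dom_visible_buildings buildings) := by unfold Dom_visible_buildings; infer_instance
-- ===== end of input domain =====

-- B replaces A's stateful running-max loop by a stateless per-element filter that re-scans each building's whole prefix; objective: alternative decomposition (B is O(n^2), not faster).

-- ===== PORT A =====
-- A's for-loop over the buildings, carrying (visible, max_height), appending when strictly taller.
def visible_buildings (buildings : List Int) : List Int :=
  (buildings.foldl
    (fun (st : List Int × Int) b =>
      if b > st.2 then (st.1 ++ [b], b) else st)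
    ([], 0)).1

-- ===== PORT B =====
-- [b for i, b in enumerate(buildings) if b > 0 and all(b > x for x in buildings[:i])]
def visible_buildings_alt (buildings : List Int) : List Int :=
  ((PySem.List.enumerate buildings 0).filter
      (fun p => decide (p.2 > 0) &&
        (PySem.List.slice buildings none (some p.1)).all (fun x => decide (p.2 > x)))).map
    Prod.snd

-- ===== PRECONDITION & SPEC =====
def Spec_visible_buildings (buildings : List Int) (out : List Int) : Prop := out = visible_buildings_alt buildings
instance (buildings : List Int) (out : List Int) : Decidable (Spec_visible_buildings buildings out) := by unfold Spec_visible_buildings; infer_instance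

-- ===== CLAIM (what is proved, stated in full; the proofs are below) =====
def Claim_equal_visible_buildings : Prop := ∀ (buildings : List Int), Dom_visible_buildings buildings → Spec_visible_buildings buildings (visible_buildings buildings)

-- ===== LEMMAS AND PROOFS =====

lemma enum_shift (xs : List Int) : ∀ s : Int,
    PySem.List.enumerate xs (s + 1) = (PySem.List.enumerate xs s).map (fun p => (p.1 + 1, p.2)) := by
  induction xs with
  | nil => intro s; simp [PySem.List.enumerate_nil]
  | cons b t ih =>
    intro s
    simp [PySem.List.enumerate_cons, ih (s + 1)]

-- Loop invariant: A's fold from state (acc, m) produces acc ++ (B's prefix-scan filter of l, with m in place of 0).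
lemma visible_foldl_eq_prefix_filter :
    ∀ (l acc : List Int) (m : Int),
      (l.foldl (fun (st : List Int × Int) b =>
          if b > st.2 then (st.1 ++ [b], b) else st) (acc, m)).1
        = acc ++ ((PySem.List.enumerate l 0).filter
            (fun p => decide (p.2 > m) &&
              (PySem.List.slice l none (some p.1)).all (fun x => decide (p.2 > x)))).map Prod.snd := by
  intro l
  induction l with
  | nil => intro acc m; simp [PySem.List.enumerate_nil]
  | cons b t ih =>
    intro acc m
    have hslice0 : PySem.List.slice (b :: t) none (some (0 : Int)) = [] := by
      simpa using PySem.List.slice_to_natCast (b :: t) 0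
    rw [List.foldl_cons, PySem.List.enumerate_cons, enum_shift t 0, List.filter_cons,
      List.filter_map]
    by_cases hb : b > m
    · rw [if_pos hb, ih (acc ++ [b]) b]
      have hc : (decide (((0 : Int), b).2 > m) &&
          (PySem.List.slice (b :: t) none (some ((0 : Int), b).1)).all
            fun x => decide (((0 : Int), b).2 > x)) = true := by
        simp [hslice0, hb]
      rw [if_pos hc, List.map_cons, List.map_map]
      have hf : List.filter
            ((fun p : Int × Int => decide (p.2 > m) &&
                ((PySem.List.slice (b :: t) none (some p.1)).all fun x => decide (p.2 > x))) ∘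
              fun p : Int × Int => (p.1 + 1, p.2)) (PySem.List.enumerate t)
          = List.filter
              (fun p : Int × Int => decide (p.2 > b) &&
                ((PySem.List.slice t none (some p.1)).all fun x => decide (p.2 > x)))
              (PySem.List.enumerate t) := by
        apply List.filter_congr
        intro p hp
        obtain ⟨k, hk, rfl⟩ := (PySem.List.mem_enumerate_iff t 0 p).mp hp
        have hcast : ((k : Nat) : Int) + 1 = ((k + 1 : Nat) : Int) := by norm_cast
        have hcast2 : (0 : Int) + (k : Nat) = ((k : Nat) : Int) := by ring
        simp only [Function.comp_apply, hcast2, hcast, PySem.List.slice_to_natCast,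
          List.take_succ_cons, List.all_cons]
        by_cases h1 : t[k] > b
        · have h2 : t[k] > m := by omega
          simp [h1, h2]
        · simp [h1]
      rw [hf]
      simp [Function.comp]
    · rw [if_neg hb, ih acc m]
      have hc : (decide (((0 : Int), b).2 > m) &&
          (PySem.List.slice (b :: t) none (some ((0 : Int), b).1)).all
            fun x => decide (((0 : Int), b).2 > x)) = false := by
        simp [hslice0]; omega
      rw [hc, if_neg (by simp), List.map_map]
      have hf : List.filter
            ((fun p : Int × Int => decide (p.2 > m) &&
                ((PySem.List.slice (b :: t) none (some p.1)).all fun x => decide (p.2 > x))) ∘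
              fun p : Int × Int => (p.1 + 1, p.2)) (PySem.List.enumerate t)
          = List.filter
              (fun p : Int × Int => decide (p.2 > m) &&
                ((PySem.List.slice t none (some p.1)).all fun x => decide (p.2 > x)))
              (PySem.List.enumerate t) := by
        apply List.filter_congr
        intro p hp
        obtain ⟨k, hk, rfl⟩ := (PySem.List.mem_enumerate_iff t 0 p).mp hp
        have hcast : ((k : Nat) : Int) + 1 = ((k + 1 : Nat) : Int) := by norm_cast
        have hcast2 : (0 : Int) + (k : Nat) = ((k : Nat) : Int) := by ring
        simp only [Function.comp_apply, hcast2, hcast, PySem.List.slice_to_natCast,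
          List.take_succ_cons, List.all_cons]
        by_cases h1 : t[k] > m
        · have h2 : t[k] > b := by omega
          simp [h1, h2]
        · simp [h1]
      rw [hf]
      simp [Function.comp]

-- ===== VERDICT (by name: the statement is the Claim_ definition above) =====
theorem visible_buildings_spec : Claim_equal_visible_buildings := by
  intro buildings _
  unfold Spec_visible_buildings visible_buildings visible_buildings_alt
  simpa using visible_foldl_eq_prefix_filter buildings [] 0
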